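-- pv_equiv track=rewrite | github.com/seoul-ssafy-class-2-studyclub/GaYoung_SSAFY | programmers/1111_스타 수열.py | solution
-- ===== SOURCE A (Python) =====
-- from itertools import combinations
--
-- def part(res, i):
--     check = []
--     start = 0
--     for j in range(2, len(res) + 1, 2):
--         temp = res[start:j]
--         start = j
--         if temp[0] != temp[1]:
--             check.append(set(temp))
--     if len(check) == i // 2:
--         val = check[0]
--         for idx in range(1, len(check)):
--             val = val & check[idx]
--
--         if len(val) >= 1:
--             return True
--
-- def solution(a):
--     if a == [0]:
--         return 0
--
--     n = len(a)
--     if n % 2 == 1:  # 홀수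
--         for i in range(n - 1, 1, -2):
--             result = combinations(a, i)
--             for res in result:
--                 if part(res, i):
--                     return i
--
--     else:  # 짝수
--         for i in range(n, 1, -2):
--             result = combinations(a, i)
--             for res in result:
--                 if part(res, i):
--                     return i
--
--     return 0
-- ===== SOURCE B (Python) =====
-- def solution(a):
--     # Greedy per candidate value x: scan left to right, pair a[i],a[i+1] whenever
--     # the two differ and one of them is x; the answer is twice the best count.
--     best = 0
--     for x in set(a):
--         cnt = 0
--         i = 0
--         while i < len(a) - 1:
--             if a[i] != a[i + 1] and (a[i] == x or a[i + 1] == x):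
--                 cnt += 1
--                 i += 2
--             else:
--                 i += 1
--         if cnt > best:
--             best = cnt
--     return 2 * best
-- ===== Notes on version B (the rewrite author's own statement) =====
-- stated objective: faster
-- what changed: Replaces the exhaustive search over all even-length combinations (checking each candidate subsequence with part) by a single greedy left-to-right scan per distinct value x that pairs adjacent differing elements containing x; the answer is twice the best count.
import Mathlib
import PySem

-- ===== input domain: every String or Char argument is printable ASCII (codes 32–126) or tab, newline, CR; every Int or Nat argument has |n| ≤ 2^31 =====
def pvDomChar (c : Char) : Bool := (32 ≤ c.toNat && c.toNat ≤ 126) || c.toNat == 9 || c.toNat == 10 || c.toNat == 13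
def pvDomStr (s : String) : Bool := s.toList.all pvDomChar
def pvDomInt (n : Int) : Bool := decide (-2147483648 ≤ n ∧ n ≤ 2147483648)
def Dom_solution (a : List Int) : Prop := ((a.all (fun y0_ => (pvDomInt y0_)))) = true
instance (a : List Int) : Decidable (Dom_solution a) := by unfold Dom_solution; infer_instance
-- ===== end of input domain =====

-- B replaces A's exhaustive search over all even-length combinations by one greedy
-- scan per distinct value (objective: faster, asymptotically).

-- ===== PORT A =====
-- part(res, i): chunk res into consecutive pairs, collect set(pair) for the distinct
-- pairs, require all i//2 pairs distinct and a common element.  temp is always the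
-- 2-element slice res[start:j], so temp[0]/temp[1] are ported with pyGetD (in range).
def part (res : List Int) (i : Int) : Bool :=
  let st :=
    (PySem.List.pyRange 2 (PySem.List.len res + 1) 2).foldl
      (fun (st : List (PySem.Set Int) × Int) j =>
        let temp := PySem.List.slice res (some st.2) (some j)
        if PySem.List.pyGetD temp 0 0 ≠ PySem.List.pyGetD temp 1 0 then
          (st.1 ++ [PySem.Set.ofList temp], j)
        else (st.1, j))
      ([], 0)
  let check := st.1
  if PySem.List.len check = PySem.Int.floordiv i 2 then
    let val :=
      (PySem.List.pyRange 1 (PySem.List.len check) 1).foldl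
        (fun v idx => PySem.Set.inter v (PySem.List.pyGetD check idx []))
        (PySem.List.pyGetD check 0 [])
    decide (1 ≤ PySem.List.len val)
  else
    false  -- Python falls through and returns None (falsy)

-- the 'for i in …: for res in combinations(a, i): if part(res,i): return i' loops;
-- every i produced by the range is ≥ 2, so i.toNat is exact.
def findStar (a : List Int) : List Int → Int
  | [] => 0
  | i :: rest =>
    if (PySem.List.combinations a i.toNat).any (fun res => part res i) then i
    else findStar a rest

def solution (a : List Int) : Int :=
  if a = [0] then 0
  else
    let n := PySem.List.len a
    if PySem.Int.mod n 2 = 1 then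
      findStar a (PySem.List.pyRange (n - 1) 1 (-2))
    else
      findStar a (PySem.List.pyRange n 1 (-2))

-- ===== PORT B =====
-- the while loop over index i, ported as structural recursion on the remaining suffix
def greedy (x : Int) : List Int → Int
  | y :: z :: t => if y ≠ z ∧ (y = x ∨ z = x) then greedy x t + 1 else greedy x (z :: t)
  | _ => 0

def solution_alt (a : List Int) : Int :=
  2 * (PySem.Set.ofList a).foldl
        (fun best x => if best < greedy x a then greedy x a else best) 0

-- ===== PRECONDITION & SPEC =====
def Spec_solution (a : List Int) (out : Int) : Prop := out = solution_alt a
instance (a : List Int) (out : Int) : Decidable (Spec_solution a out) := by unfold Spec_solution; infer_instance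

-- ===== CLAIM (what is proved, stated in full; the proofs are below) =====
def Claim_equal_solution : Prop := ∀ (a : List Int), Dom_solution a → Spec_solution a (solution a)

-- ===== LEMMAS AND PROOFS =====

-- l is a "star pairing" for x: consecutive pairs, each of distinct elements, each containing x
inductive Pairing (x : Int) : List Int → Prop
  | nil : Pairing x []
  | cons {p q : Int} {t : List Int} : p ≠ q → (p = x ∨ q = x) → Pairing x t → Pairing x (p :: q :: t)

-- the sequence of pair-sets that A's first loop collects
def pairSets : List Int → List (PySem.Set Int)
  | p :: q :: t => (if p ≠ q then [PySem.Set.ofList [p, q]] else []) ++ pairSets t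
  | _ => []

lemma pyRange_two_nil (a b : Int) (h : b ≤ a) : PySem.List.pyRange a b 2 = [] := by
  rw [PySem.List.pyRange_of_pos a b (by norm_num), if_neg (by omega)]; simp

lemma pyRange_two_cons (a b : Int) (h : a < b) :
    PySem.List.pyRange a b 2 = a :: PySem.List.pyRange (a + 2) b 2 := by
  rw [PySem.List.pyRange_of_pos a b (by norm_num), PySem.List.pyRange_of_pos (a+2) b (by norm_num),
      if_pos h]
  have hcount : ((b - a + 2 - 1) / 2).toNat
      = (if a + 2 < b then ((b - (a+2) + 2 - 1) / 2).toNat else 0) + 1 := by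
    split_ifs <;> omega
  rw [hcount, List.range_succ_eq_map]
  simp [List.map_map, Function.comp]
  intro k _; ring

lemma pyRange_negtwo_nil (a b : Int) (h : a ≤ b) : PySem.List.pyRange a b (-2) = [] := by
  unfold PySem.List.pyRange
  rw [if_neg (show ¬((-2:Int) = 0) by norm_num)]
  simp only [show ¬((0:Int) < -2) by norm_num, if_false, if_neg (show ¬(b < a) by omega)]
  simp

lemma pyRange_negtwo_cons (a b : Int) (h : b < a) :
    PySem.List.pyRange a b (-2) = a :: PySem.List.pyRange (a - 2) b (-2) := by
  unfold PySem.List.pyRange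
  rw [if_neg (show ¬((-2:Int) = 0) by norm_num), if_neg (show ¬((-2:Int) = 0) by norm_num)]
  simp only [show ¬((0:Int) < -2) by norm_num, if_false, if_pos h]
  have hcount : ((a - b + - -2 - 1) / - -2).toNat
      = (if b < a - 2 then ((a - 2 - b + - -2 - 1) / - -2).toNat else 0) + 1 := by
    norm_num; split_ifs <;> omega
  rw [hcount, List.range_succ_eq_map]
  simp [List.map_map, Function.comp]
  intro k _; ring

lemma checkFold (k : Nat) :
    ∀ (t pre : List Int) (acc : List (PySem.Set Int)), t.length = 2 * k →
    ((PySem.List.pyRange ((pre.length : Int) + 2) ((pre.length : Int) + t.length + 1) 2).foldl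
      (fun (st : List (PySem.Set Int) × Int) j =>
        let temp := PySem.List.slice (pre ++ t) (some st.2) (some j)
        if PySem.List.pyGetD temp 0 0 ≠ PySem.List.pyGetD temp 1 0 then
          (st.1 ++ [PySem.Set.ofList temp], j)
        else (st.1, j))
      (acc, (pre.length : Int)))
    = (acc ++ pairSets t, (pre.length : Int) + t.length) := by
  induction k with
  | zero =>
    intro t pre acc ht
    have ht0 : t = [] := by simpa using List.length_eq_zero_iff.mp (by omega)
    subst ht0
    rw [pyRange_two_nil _ _ (by omega)]
    simp [pairSets]
  | succ k ih =>
    intro t pre acc ht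
    match t with
    | y :: z :: t' =>
      rw [pyRange_two_cons _ _ (by omega)]
      simp only [List.foldl_cons]
      have hslice : PySem.List.slice (pre ++ y :: z :: t') (some (pre.length : Int))
          (some ((pre.length : Int) + 2)) = [y, z] := by
        have : ((pre.length : Int) + 2) = ((pre.length : Int) + ((2:Nat) : Int)) := by push_cast; ring
        rw [this, PySem.List.slice_natCast_add]
        simp
      rw [hslice]
      have hg0 : PySem.List.pyGetD [y, z] (0:Int) 0 = y := by rfl
      have hg1 : PySem.List.pyGetD [y, z] (1:Int) 0 = z := by rfl
      rw [hg0, hg1]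
      have hrw : pre ++ y :: z :: t' = (pre ++ [y, z]) ++ t' := by simp
      have hlen : ((pre ++ [y, z]).length : Int) = (pre.length : Int) + 2 := by simp
      have hrange : PySem.List.pyRange ((pre.length : Int) + 2 + 2)
            ((pre.length : Int) + (y :: z :: t').length + 1) 2
          = PySem.List.pyRange (((pre ++ [y,z]).length : Int) + 2)
            (((pre ++ [y,z]).length : Int) + t'.length + 1) 2 := by
        rw [hlen]; congr 1; simp; ring
      by_cases hyz : y ≠ z
      · rw [if_pos hyz, hrange]
        simp only [hrw]
        rw [show ((pre.length:Int)+2) = ((pre ++ [y,z]).length : Int) from hlen.symm]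
        rw [ih t' (pre ++ [y,z]) (acc ++ [PySem.Set.ofList [y,z]]) (by simp at ht; omega)]
        simp [pairSets, hyz]
        ring
      · rw [if_neg hyz, hrange]
        simp only [hrw]
        rw [show ((pre.length:Int)+2) = ((pre ++ [y,z]).length : Int) from hlen.symm]
        rw [ih t' (pre ++ [y,z]) acc (by simp at ht; omega)]
        simp [pairSets, hyz]
        ring
    | [] => simp at ht
    | [y] => simp at ht; omega

lemma fold_inter_mem (y : Int) :
    ∀ (l : List (PySem.Set Int)) (v : PySem.Set Int),
      y ∈ l.foldl PySem.Set.inter v ↔ y ∈ v ∧ ∀ s ∈ l, y ∈ s := by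
  intro l
  induction l with
  | nil => simp
  | cons s rest ih =>
    intro v
    simp only [List.foldl_cons, ih, PySem.Set.mem_inter, List.mem_cons]
    constructor
    · rintro ⟨⟨hv, hs⟩, hrest⟩
      exact ⟨hv, by rintro s' (rfl | hs') <;> [exact hs; exact hrest s' hs']⟩
    · rintro ⟨hv, hall⟩
      exact ⟨⟨hv, hall s (Or.inl rfl)⟩, fun s' hs' => hall s' (Or.inr hs')⟩

lemma two_mul_pairSets_length_le : ∀ l : List Int, 2 * (pairSets l).length ≤ l.length := by
  intro l
  induction l using pairSets.induct with
  | case1 p q t ih =>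
    simp only [pairSets, List.length_append, List.length_cons]
    split_ifs <;> simp <;> omega
  | case2 l h => cases l with
    | nil => simp [pairSets]
    | cons a t => cases t with
      | nil => simp [pairSets]
      | cons b t' => exact absurd rfl (h a b t')

lemma pairSets_iff (x : Int) :
    ∀ (k : Nat) (res : List Int), res.length = 2 * k →
      (((pairSets res).length = k ∧ ∀ s ∈ pairSets res, x ∈ s) ↔ Pairing x res) := by
  intro k
  induction k with
  | zero =>
    intro res h
    have : res = [] := List.length_eq_zero_iff.mp (by omega)
    subst this
    simp [pairSets]
    exact Pairing.nil
  | succ k ih =>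
    intro res h
    match res with
    | p :: q :: t =>
      have ht : t.length = 2 * k := by simp at h; omega
      by_cases hpq : p ≠ q
      · simp only [pairSets, if_pos hpq, List.singleton_append, List.length_cons, List.mem_cons]
        constructor
        · rintro ⟨hlen, hall⟩
          have hx : x = p ∨ x = q := by
            have := hall (PySem.Set.ofList [p, q]) (Or.inl rfl)
            simpa [PySem.Set.mem_ofList] using this
          refine Pairing.cons hpq (by tauto) ?_
          exact (ih t ht).mp ⟨by omega, fun s hs => hall s (Or.inr hs)⟩
        · intro hp
          cases hp with
          | cons h1 h2 h3 =>
            obtain ⟨hlen, hall⟩ := (ih t ht).mpr h3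
            refine ⟨by omega, ?_⟩
            rintro s (rfl | hs)
            · simp [PySem.Set.mem_ofList]; tauto
            · exact hall s hs
      · simp only [pairSets, if_neg hpq, List.nil_append]
        constructor
        · rintro ⟨hlen, -⟩
          exfalso
          have := two_mul_pairSets_length_le t
          omega
        · intro hp
          cases hp with
          | cons h1 _ _ => exact absurd h1 hpq

lemma part_iff (res : List Int) (k : Nat) (h : res.length = 2 * k + 2) :
    part res (res.length : Int) = true ↔ ∃ x, Pairing x res := by
  have hc := checkFold (k+1) res [] [] (by omega)
  simp only [List.nil_append, List.length_nil, Nat.cast_zero, zero_add] at hc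
  unfold part
  simp only [PySem.List.len_eq]
  simp only [hc]
  have hdiv : PySem.Int.floordiv ((res.length:Int)) 2 = (k:Int) + 1 := by
    rw [PySem.Int.floordiv_eq_ediv_of_pos (by norm_num)]; omega
  rw [hdiv]
  by_cases hl : (pairSets res).length = k + 1
  · rw [if_pos (by exact_mod_cast hl)]
    rw [PySem.List.foldl_pyRange_pyGetD' (pairSets res) [] PySem.Set.inter _ (by norm_num)]
    obtain ⟨c0, rest, hcr⟩ : ∃ c0 rest, pairSets res = c0 :: rest := by
      cases hps : pairSets res with
      | nil => rw [hps] at hl; simp at hl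
      | cons c0 rest => exact ⟨c0, rest, rfl⟩
    rw [hcr]
    simp only [show (1:Int).toNat = 1 from rfl, List.drop_succ_cons, List.drop_zero,
      PySem.List.pyGetD_zero_cons, decide_eq_true_eq]
    constructor
    · intro hlen1
      obtain ⟨y, hy⟩ := List.exists_mem_of_ne_nil (rest.foldl PySem.Set.inter c0)
        (by intro hnil; rw [hnil] at hlen1; simp at hlen1)
      rw [fold_inter_mem] at hy
      refine ⟨y, (pairSets_iff y (k+1) res (by omega)).mp ⟨hl, ?_⟩⟩
      rw [hcr]
      intro s hs'
      rcases List.mem_cons.mp hs' with rfl | hs''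
      · exact hy.1
      · exact hy.2 s hs''
    · rintro ⟨x, hp⟩
      have hall := ((pairSets_iff x (k+1) res (by omega)).mpr hp).2
      rw [hcr] at hall
      have hx : x ∈ rest.foldl PySem.Set.inter c0 := by
        rw [fold_inter_mem]
        exact ⟨hall c0 (List.mem_cons_self ..), fun s hs => hall s (List.mem_cons_of_mem _ hs)⟩
      have hne : rest.foldl PySem.Set.inter c0 ≠ [] := fun hnil => by rw [hnil] at hx; simp at hx
      have := List.length_pos_of_ne_nil hne
      omega
  · rw [if_neg (by intro hh; exact hl (by exact_mod_cast hh))]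
    simp only [Bool.false_eq_true, false_iff]
    rintro ⟨x, hp⟩
    exact hl ((pairSets_iff x (k+1) res (by omega)).mpr hp).1

lemma sublist_tail_of_cons {p : Int} {r ys : List Int} (h : List.Sublist (p :: r) ys) :
    List.Sublist r ys.tail := by
  induction ys with
  | nil => simp at h
  | cons y t ih =>
    cases h with
    | cons _ h' => exact List.Sublist.trans (List.sublist_cons_self p r) h'
    | cons₂ _ h' => exact h'

lemma pairing_take (x : Int) {l : List Int} (h : Pairing x l) :
    ∀ m : Nat, Pairing x (l.take (2 * m)) := by
  induction h with
  | nil => intro m; simp; exact Pairing.nil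
  | cons h1 h2 h3 ih =>
    intro m
    cases m with
    | zero => simpa using Pairing.nil
    | succ m =>
      have h2m : 2 * (m + 1) = (2 * m) + 1 + 1 := by omega
      rw [h2m]
      simp only [List.take_succ_cons]
      exact Pairing.cons h1 h2 (ih m)

lemma greedy_nonneg (x : Int) : ∀ l : List Int, 0 ≤ greedy x l := by
  intro l
  induction l using greedy.induct x with
  | case1 y z t h ih => rw [greedy, if_pos h]; omega
  | case2 y z t h ih => rw [greedy, if_neg h]; exact ih
  | case3 l h => cases l with
    | nil => simp [greedy]
    | cons a t => cases t with
      | nil => simp [greedy]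
      | cons b t' => exact absurd rfl (h a b t')

lemma greedy_le (x : Int) :
    ∀ (a l : List Int), List.Sublist l a → Pairing x l → (l.length : Int) ≤ 2 * greedy x a := by
  intro a
  induction a using greedy.induct x with
  | case1 y z t hv ih =>
    intro l hs hp
    rw [greedy, if_pos hv]
    cases hp with
    | nil => have := greedy_nonneg x t; simp; omega
    | @cons p q m h1 h2 h3 =>
      have hm : List.Sublist m t := by
        have h5 := sublist_tail_of_cons (sublist_tail_of_cons hs)
        simpa using h5
      have := ih m hm h3
      simp only [List.length_cons]; push_cast; omega
  | case2 y z t hnv ih =>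
    intro l hs hp
    rw [greedy, if_neg hnv]
    cases hs with
    | cons _ h' => exact ih l h' hp
    | cons₂ _ h' =>
      cases hp with
      | @cons p q m h1 h2 h3 =>
        cases h' with
        | cons _ h2' =>
          by_cases hyz : y = z
          · have hp' : Pairing x (z :: q :: m) :=
              Pairing.cons (hyz ▸ h1) (hyz ▸ h2) h3
            have := ih (z :: q :: m) (List.Sublist.cons₂ z h2') hp'
            simp only [List.length_cons] at this ⊢; push_cast at this ⊢; omega
          · have hx : ¬(y = x ∨ z = x) := fun hor => hnv ⟨hyz, hor⟩
            have hzx : z ≠ x := fun hh => hx (Or.inr hh)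
            have hqx : q = x := by tauto
            have hp' : Pairing x (z :: q :: m) :=
              Pairing.cons (by rw [hqx]; exact fun h => hzx h) (Or.inr hqx) h3
            have := ih (z :: q :: m) (List.Sublist.cons₂ z h2') hp'
            simp only [List.length_cons] at this ⊢; push_cast at this ⊢; omega
        | cons₂ _ h2' => exact absurd ⟨h1, h2⟩ hnv
  | case3 t h =>
    intro l hs hp
    match t, h with
    | [], _ =>
      have : l = [] := List.sublist_nil.mp hs
      subst this; simp [greedy]
    | [c], _ =>
      cases hp with
      | nil => simp [greedy]
      | cons _ _ _ => have := hs.length_le; simp at this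
    | c1 :: c2 :: t', hfalse => exact absurd rfl (hfalse c1 c2 t')

lemma greedy_achieve (x : Int) :
    ∀ a : List Int, ∃ l, List.Sublist l a ∧ Pairing x l ∧ (l.length : Int) = 2 * greedy x a := by
  intro a
  induction a using greedy.induct x with
  | case1 y z t hv ih =>
    obtain ⟨l, hs, hp, hl⟩ := ih
    refine ⟨y :: z :: l, List.Sublist.cons₂ _ (List.Sublist.cons₂ _ hs),
      Pairing.cons hv.1 hv.2 hp, ?_⟩
    rw [greedy, if_pos hv]
    simp only [List.length_cons]; push_cast; omega
  | case2 y z t hnv ih =>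
    obtain ⟨l, hs, hp, hl⟩ := ih
    exact ⟨l, List.Sublist.cons y hs, hp, by rw [greedy, if_neg hnv]; exact hl⟩
  | case3 t h =>
    refine ⟨[], List.nil_sublist t, Pairing.nil, ?_⟩
    match t, h with
    | [], _ => simp [greedy]
    | [c], _ => simp [greedy]
    | c1 :: c2 :: t', hfalse => exact absurd rfl (hfalse c1 c2 t')

-- the fold computing B's best count
def bestFold (a : List Int) : Int :=
  (PySem.Set.ofList a).foldl (fun best x => if best < greedy x a then greedy x a else best) 0

lemma le_bestFold_init (a : List Int) :
    ∀ (l : List Int) (b : Int),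
      b ≤ l.foldl (fun best x => if best < greedy x a then greedy x a else best) b := by
  intro l
  induction l with
  | nil => intro b; simp
  | cons y rest ih =>
    intro b
    simp only [List.foldl_cons]
    refine le_trans ?_ (ih _)
    split_ifs with hh <;> omega

lemma bestFold_ge (a : List Int) :
    ∀ (l : List Int) (b x : Int), x ∈ l →
      greedy x a ≤ l.foldl (fun best x => if best < greedy x a then greedy x a else best) b := by
  intro l
  induction l with
  | nil => intro b x hx; simp at hx
  | cons y rest ih =>
    intro b x hx
    simp only [List.foldl_cons]
    rcases List.mem_cons.mp hx with rfl | hx'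
    · refine le_trans ?_ (le_bestFold_init a rest _)
      split_ifs with hh <;> omega
    · exact ih _ x hx'

lemma bestFold_cases (a : List Int) :
    ∀ (l : List Int) (b : Int),
      l.foldl (fun best x => if best < greedy x a then greedy x a else best) b = b ∨
      ∃ x ∈ l, l.foldl (fun best x => if best < greedy x a then greedy x a else best) b
        = greedy x a := by
  intro l
  induction l with
  | nil => intro b; left; rfl
  | cons y rest ih =>
    intro b
    simp only [List.foldl_cons]
    by_cases hh : b < greedy y a
    · rw [if_pos hh]
      rcases ih (greedy y a) with h | ⟨x, hx, h⟩
      · exact Or.inr ⟨y, List.mem_cons_self .., h⟩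
      · exact Or.inr ⟨x, List.mem_cons_of_mem _ hx, h⟩
    · rw [if_neg hh]
      rcases ih b with h | ⟨x, hx, h⟩
      · exact Or.inl h
      · exact Or.inr ⟨x, List.mem_cons_of_mem _ hx, h⟩

lemma bestFold_nonneg (a : List Int) : 0 ≤ bestFold a := le_bestFold_init a _ 0

lemma hit_iff (a : List Int) (i : Int) (k : Nat) (hk : i = 2 * (k : Int) + 2) :
    ((PySem.List.combinations a i.toNat).any (fun res => part res i) = true) ↔
      i ≤ 2 * bestFold a := by
  have hiN : i.toNat = 2 * k + 2 := by omega
  constructor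
  · intro hany
    obtain ⟨res, hmem, hpart⟩ := List.any_eq_true.mp hany
    obtain ⟨hsub, hlen⟩ := (PySem.List.mem_combinations_iff a i.toNat res).mp hmem
    have hlen' : res.length = 2 * k + 2 := by omega
    have hi : ((res.length : Int)) = i := by omega
    rw [← hi] at hpart
    obtain ⟨x, hp⟩ := (part_iff res k hlen').mp hpart
    match res, hp with
    | p :: q :: m, Pairing.cons h1 h2 h3 =>
      have hxa : x ∈ a := by
        rcases h2 with rfl | rfl
        · exact hsub.subset (List.mem_cons_self ..)
        · exact hsub.subset (List.mem_cons_of_mem _ (List.mem_cons_self ..))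
      have hle := greedy_le x a _ hsub (Pairing.cons h1 h2 h3)
      have hbf := bestFold_ge a (PySem.Set.ofList a) 0 x ((PySem.Set.mem_ofList a x).mpr hxa)
      rw [← hi]
      calc ((p :: q :: m).length : Int) ≤ 2 * greedy x a := hle
        _ ≤ 2 * bestFold a := by unfold bestFold; omega
  · intro hle
    have h1K : 1 ≤ bestFold a := by omega
    rcases bestFold_cases a (PySem.Set.ofList a) 0 with hz | ⟨x, hx, hxeq⟩
    · exfalso; unfold bestFold at h1K; omega
    · have hKx : bestFold a = greedy x a := hxeq
      obtain ⟨l, hs, hp, hll⟩ := greedy_achieve x a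
      have hllK : (l.length : Int) = 2 * bestFold a := by rw [hKx]; exact hll
      set res := l.take (2 * (k + 1)) with hres
      have hplen : res.length = 2 * k + 2 := by
        rw [hres, List.length_take]
        omega
      have hpres : Pairing x res := pairing_take x hp (k + 1)
      have hrsub : List.Sublist res a := List.Sublist.trans (List.take_sublist _ _) hs
      apply List.any_eq_true.mpr
      refine ⟨res, (PySem.List.mem_combinations_iff a i.toNat res).mpr ⟨hrsub, by omega⟩, ?_⟩
      have hi : ((res.length : Int)) = i := by omega
      rw [← hi]
      exact (part_iff res k hplen).mpr ⟨x, hpres⟩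

lemma bestFold_le_len (a : List Int) : 2 * bestFold a ≤ (a.length : Int) := by
  rcases bestFold_cases a (PySem.Set.ofList a) 0 with hz | ⟨x, hx, hxeq⟩
  · unfold bestFold; rw [hz]; omega
  · obtain ⟨l, hs, hp, hll⟩ := greedy_achieve x a
    have := hs.length_le
    unfold bestFold; rw [hxeq, ← hll]
    exact_mod_cast this

lemma findStar_range (a : List Int) :
    ∀ (m : Nat), bestFold a ≤ (m : Int) →
      findStar a (PySem.List.pyRange (2 * (m : Int)) 1 (-2)) = 2 * bestFold a := by
  intro m
  induction m with
  | zero =>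
    intro hm
    rw [pyRange_negtwo_nil _ _ (by norm_num)]
    have := bestFold_nonneg a
    simp only [findStar]
    omega
  | succ m ih =>
    intro hm
    rw [pyRange_negtwo_cons _ _ (by push_cast; omega)]
    simp only [findStar]
    have hhit := hit_iff a (2 * ((m:Nat) : Int) + 2) m rfl
    have harg : 2 * (((m:Nat) + 1 : Nat) : Int) = 2 * ((m:Nat) : Int) + 2 := by push_cast; ring
    rw [harg]
    by_cases hcase : bestFold a = (m : Int) + 1
    · rw [if_pos (hhit.mpr (by omega))]
      omega
    · rw [if_neg (by rw [hhit]; omega)]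
      have harg2 : 2 * ((m:Nat) : Int) + 2 - 2 = 2 * ((m:Nat) : Int) := by ring
      rw [harg2]
      exact ih (by omega)

-- ===== VERDICT (by name: the statement is the Claim_ definition above) =====
theorem solution_spec : Claim_equal_solution := by
  unfold Claim_equal_solution Spec_solution
  intro a _
  by_cases h0 : a = [0]
  · subst h0; rfl
  · unfold solution
    rw [if_neg h0]
    simp only [PySem.List.len_eq]
    have hK0 := bestFold_nonneg a
    have hKlen := bestFold_le_len a
    have halt : solution_alt a = 2 * bestFold a := rfl
    by_cases hodd : PySem.Int.mod ((a.length : Int)) 2 = 1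
    · rw [if_pos hodd]
      have hodd' : a.length % 2 = 1 := by
        rw [PySem.Int.mod_eq_emod_of_pos (by norm_num)] at hodd
        omega
      obtain ⟨j, hj⟩ : ∃ j : Nat, a.length = 2 * j + 1 := ⟨a.length / 2, by omega⟩
      have hr : (a.length : Int) - 1 = 2 * (j : Int) := by rw [hj]; push_cast; ring
      rw [hr, findStar_range a j (by omega), halt]
    · rw [if_neg hodd]
      have heven' : a.length % 2 = 0 := by
        rw [PySem.Int.mod_eq_emod_of_pos (by norm_num)] at hodd
        omega
      obtain ⟨j, hj⟩ : ∃ j : Nat, a.length = 2 * j := ⟨a.length / 2, by omega⟩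
      have hr : (a.length : Int) = 2 * (j : Int) := by rw [hj]; push_cast; ring
      rw [hr, findStar_range a j (by omega), halt]
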